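-- pv_equiv track=rewrite | github.com/Oddvar-N-O/BehaviourMapperV2Levering | backend/behaviourmapper/routes.py | getPairsOfCoordinatesFromFloatList
-- ===== SOURCE A (Python) =====
-- def getPairsOfCoordinatesFromFloatList(listOfCoordinates):
--     allCoords = []
--     cordNum = 0
--     pairXY = []
--     for coord in listOfCoordinates:
--         pairXY.append(coord)
--         cordNum += 1
--         if cordNum == 2:
--             allCoords.append(pairXY)
--             pairXY = []
--             cordNum = 0
--     return allCoords
-- ===== SOURCE B (Python) =====
-- def getPairsOfCoordinatesFromFloatList(listOfCoordinates):
--     it = iter(listOfCoordinates)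
--     return [list(p) for p in zip(it, it)]
-- ===== Notes on version B (the rewrite author's own statement) =====
-- stated objective: idiomatic
-- what changed: Replaces the counter/buffer state machine with iterator pairing (zip of the same iterator twice), which pairs consecutive elements and drops a trailing odd element naturally.
import Mathlib
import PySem

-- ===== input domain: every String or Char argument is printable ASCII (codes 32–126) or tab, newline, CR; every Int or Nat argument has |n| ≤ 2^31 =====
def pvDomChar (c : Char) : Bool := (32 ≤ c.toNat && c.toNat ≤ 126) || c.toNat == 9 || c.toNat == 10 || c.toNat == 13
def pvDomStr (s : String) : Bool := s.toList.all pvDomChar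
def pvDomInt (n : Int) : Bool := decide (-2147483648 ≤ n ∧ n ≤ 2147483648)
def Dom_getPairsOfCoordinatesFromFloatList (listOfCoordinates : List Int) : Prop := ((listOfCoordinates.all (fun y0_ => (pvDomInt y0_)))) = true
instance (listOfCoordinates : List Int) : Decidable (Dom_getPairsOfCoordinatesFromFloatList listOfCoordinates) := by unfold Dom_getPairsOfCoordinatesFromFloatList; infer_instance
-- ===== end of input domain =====

-- B replaces A's counter/buffer state machine with direct iterator pairing (two-at-a-time); return value only, no speed claim.

-- ===== PORT A =====
-- A's loop: state (allCoords, cordNum, pairXY), flushing pairXY into allCoords when cordNum hits 2.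
def pvStepA (st : List (List Int) × Int × List Int) (coord : Int) : List (List Int) × Int × List Int :=
  let pairXY := st.2.2 ++ [coord]
  let cordNum := st.2.1 + 1
  if cordNum == 2 then (st.1 ++ [pairXY], 0, [])
  else (st.1, cordNum, pairXY)

def getPairsOfCoordinatesFromFloatList (listOfCoordinates : List Int) : List (List Int) :=
  (listOfCoordinates.foldl pvStepA ([], 0, [])).1

-- ===== PORT B =====
-- Source B pairs consecutive elements by pulling two at a time from one iterator; a trailing odd element is dropped.
def getPairsOfCoordinatesFromFloatList_alt (listOfCoordinates : List Int) : List (List Int) :=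
  match listOfCoordinates with
  | x :: y :: rest => [x, y] :: getPairsOfCoordinatesFromFloatList_alt rest
  | _ => []

-- ===== PRECONDITION & SPEC =====
def Spec_getPairsOfCoordinatesFromFloatList (listOfCoordinates : List Int) (out : List (List Int)) : Prop := out = getPairsOfCoordinatesFromFloatList_alt listOfCoordinates
instance (listOfCoordinates : List Int) (out : List (List Int)) : Decidable (Spec_getPairsOfCoordinatesFromFloatList listOfCoordinates out) := by unfold Spec_getPairsOfCoordinatesFromFloatList; infer_instance

-- ===== CLAIM (what is proved, stated in full; the proofs are below) =====
def Claim_equal_getPairsOfCoordinatesFromFloatList : Prop := ∀ (listOfCoordinates : List Int), Dom_getPairsOfCoordinatesFromFloatList listOfCoordinates → Spec_getPairsOfCoordinatesFromFloatList listOfCoordinates (getPairsOfCoordinatesFromFloatList listOfCoordinates)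

-- ===== LEMMAS AND PROOFS =====

-- Loop invariant: started at count 0 with empty buffer, A's fold accumulates exactly the pairs.
theorem pvFold_key : ∀ (n : Nat) (l : List Int) (acc : List (List Int)), l.length ≤ n →
    (l.foldl pvStepA (acc, 0, [])).1 = acc ++ getPairsOfCoordinatesFromFloatList_alt l := by
  intro n
  induction n with
  | zero =>
    intro l acc h
    have : l = [] := List.eq_nil_of_length_eq_zero (Nat.le_zero.mp h)
    subst this
    simp [getPairsOfCoordinatesFromFloatList_alt]
  | succ m ih =>
    intro l acc h
    match l with
    | [] => simp [getPairsOfCoordinatesFromFloatList_alt]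
    | [x] => simp [getPairsOfCoordinatesFromFloatList_alt, List.foldl, pvStepA]
    | x :: y :: rest =>
      have hlen : rest.length ≤ m := by
        simp at h; omega
      have h1 : List.foldl pvStepA (acc, 0, []) (x :: y :: rest)
          = List.foldl pvStepA (acc ++ [[x, y]], 0, []) rest := by
        simp [List.foldl, pvStepA]
      rw [h1, ih rest (acc ++ [[x, y]]) hlen]
      simp [getPairsOfCoordinatesFromFloatList_alt]

-- ===== VERDICT (by name: the statement is the Claim_ definition above) =====
theorem getPairsOfCoordinatesFromFloatList_spec : Claim_equal_getPairsOfCoordinatesFromFloatList := by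
  intro l _
  unfold Spec_getPairsOfCoordinatesFromFloatList getPairsOfCoordinatesFromFloatList
  simpa using pvFold_key l.length l [] le_rfl
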